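-- pv_equiv track=rewrite | github.com/CharlyGH/dia2sql | gui/window_methods.py | format_label
-- ===== SOURCE A (Python) =====
-- def format_label(field):
--     upper = True
--     result = ""
--     for idx in range(len(field)):
--         chr = field[idx]
--         if upper:
--             result += chr.upper()
--         else:
--             result += chr.lower()
--         upper = (chr == '_')
--
--     return result
-- ===== SOURCE B (Python) =====
-- def format_label(field):
--     return '_'.join(seg[:1].upper() + seg[1:].lower() for seg in field.split('_'))
-- ===== Notes on version B (the rewrite author's own statement) =====
-- stated objective: idiomatic
-- what changed: Replaces A's stateful per-character scan with an upper flag carried across the loop by splitting the string on the underscore separator, uppercasing each segment's first character and lowercasing the rest, then joining the segments back.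
import Mathlib
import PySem

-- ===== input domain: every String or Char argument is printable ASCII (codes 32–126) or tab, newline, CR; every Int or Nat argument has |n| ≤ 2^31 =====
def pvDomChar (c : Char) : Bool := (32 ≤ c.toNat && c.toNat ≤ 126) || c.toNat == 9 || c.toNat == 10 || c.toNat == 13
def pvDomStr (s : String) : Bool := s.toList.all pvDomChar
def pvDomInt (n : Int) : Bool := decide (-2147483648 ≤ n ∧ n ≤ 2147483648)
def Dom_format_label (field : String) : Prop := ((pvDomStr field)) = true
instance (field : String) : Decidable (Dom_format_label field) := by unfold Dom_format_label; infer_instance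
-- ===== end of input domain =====

-- B replaces A's stateful per-character scan by split-on-'_' / per-segment capitalise / join (idiomatic; same cost).

-- ===== PORT A =====
-- A: for idx in range(len(field)): chr = field[idx]; result += chr.upper()/chr.lower(); upper = (chr == '_')
def format_label (field : String) : String :=
  let st := (PySem.List.pyRange 0 (PySem.Str.len field) 1).foldl
    (fun (st : Bool × List Char) idx =>
      let c := PySem.List.pyGetD field.toList idx ' '
      ((c == '_'), st.2 ++ [if st.1 then PySem.Chars.upperChar c else PySem.Chars.lowerChar c]))
    (true, [])
  String.ofList st.2

-- ===== PORT B =====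
-- seg[:1].upper() + seg[1:].lower()  (slices are exact PySem.List.slice on the char list)
def pvCapSeg (seg : List Char) : List Char :=
  PySem.Chars.upper (PySem.List.slice seg none (some 1)) ++
    PySem.Chars.lower (PySem.List.slice seg (some 1) none)

-- field.split('_') is List.splitOn '_' on the char list; '_'.join is PySem.Chars.join
def format_label_alt (field : String) : String :=
  String.ofList (PySem.Chars.join ['_'] ((field.toList.splitOn '_').map pvCapSeg))

-- ===== PRECONDITION & SPEC =====
def Spec_format_label (field : String) (out : String) : Prop := out = format_label_alt field
instance (field : String) (out : String) : Decidable (Spec_format_label field out) := by unfold Spec_format_label; infer_instance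

-- ===== CLAIM (what is proved, stated in full; the proofs are below) =====
def Claim_equal_format_label : Prop := ∀ (field : String), Dom_format_label field → Spec_format_label field (format_label field)

-- ===== LEMMAS AND PROOFS =====

-- A's scan, as a structural recursion on the char list carrying the `upper` flag
def pvGoA : Bool → List Char → List Char
  | _, [] => []
  | u, c :: cs =>
      (if u then PySem.Chars.upperChar c else PySem.Chars.lowerChar c) :: pvGoA (c == '_') cs

lemma pvFoldl_eq_goA (cs : List Char) : ∀ (u : Bool) (acc : List Char),
    (cs.foldl
      (fun (st : Bool × List Char) c =>
        ((c == '_'), st.2 ++ [if st.1 then PySem.Chars.upperChar c else PySem.Chars.lowerChar c]))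
      (u, acc)).2 = acc ++ pvGoA u cs := by
  induction cs with
  | nil => intro u acc; simp [pvGoA]
  | cons c cs ih => intro u acc; simp [pvGoA, ih, List.append_assoc]

lemma pvSplitOn_ne_nil (cs : List Char) : ∃ h t, cs.splitOn '_' = h :: t := by
  induction cs with
  | nil => exact ⟨[], [], rfl⟩
  | cons c cs ih =>
    obtain ⟨h, t, hht⟩ := ih
    by_cases hc : c = '_'
    · exact ⟨[], cs.splitOn '_', by simp [List.splitOn, List.splitOnP_cons, hc]⟩
    · refine ⟨c :: h, t, ?_⟩
      simp only [List.splitOn] at hht ⊢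
      simp [List.splitOnP_cons, hc, hht]

lemma pvCapSeg_nil : pvCapSeg [] = [] := by decide

lemma pvCapSeg_cons (c : Char) (h : List Char) :
    pvCapSeg (c :: h) = PySem.Chars.upperChar c :: PySem.Chars.lower h := by
  unfold pvCapSeg
  rw [PySem.List.slice_to _ (by omega), PySem.List.slice_from _ (by omega)]
  simp [PySem.Chars.upper, PySem.Chars.lower]

lemma pvJoin_cons_head (x : Char) (b : List Char) (t : List (List Char)) :
    PySem.Chars.join ['_'] ((x :: b) :: t) = x :: PySem.Chars.join ['_'] (b :: t) := by
  cases t with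
  | nil => simp [PySem.Chars.join, List.intercalate]
  | cons q t => rw [PySem.Chars.join_cons_cons, PySem.Chars.join_cons_cons]; simp

-- head of the split handled by the current flag, tail capitalised
def pvHdMap : Bool → List (List Char) → List (List Char)
  | _, [] => []
  | u, h :: t => (if u then pvCapSeg h else PySem.Chars.lower h) :: t.map pvCapSeg

lemma pvKey (cs : List Char) : ∀ u,
    pvGoA u cs = PySem.Chars.join ['_'] (pvHdMap u (cs.splitOn '_')) := by
  induction cs with
  | nil => intro u; cases u <;> simp [pvGoA, pvHdMap, PySem.Chars.join, List.intercalate,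
      List.splitOn, List.splitOnP_nil, pvCapSeg_nil, PySem.Chars.lower]
  | cons c cs ih =>
    intro u
    obtain ⟨h, t, hht⟩ := pvSplitOn_ne_nil cs
    by_cases hc : c = '_'
    · subst hc
      have hsplit : ('_' :: cs).splitOn '_' = [] :: cs.splitOn '_' := by
        simp [List.splitOn, List.splitOnP_cons]
      rw [hsplit, hht]
      cases u <;>
        simp [pvGoA, pvHdMap, ih, hht, pvCapSeg_nil, PySem.Chars.lower,
          PySem.Chars.join_cons_cons, PySem.Chars.lowerChar, PySem.Chars.upperChar,
          PySem.Chars.isupper, PySem.Chars.islower]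
    · have hsplit : (c :: cs).splitOn '_' = (c :: h) :: t := by
        have := hht
        simp [List.splitOn, List.splitOnP_cons, hc] at this ⊢
        simp [this]
      rw [hsplit]
      have hcb : (c == '_') = false := by simp [hc]
      cases u with
      | false =>
        simp only [pvGoA, hcb, ih false, hht, pvHdMap, Bool.false_eq_true, if_false]
        have hl : PySem.Chars.lower (c :: h) = PySem.Chars.lowerChar c :: PySem.Chars.lower h := by
          simp [PySem.Chars.lower]
        rw [hl, pvJoin_cons_head]
      | true =>
        simp only [pvGoA, hcb, ih false, hht, pvHdMap, if_true]
        rw [pvCapSeg_cons, pvJoin_cons_head]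
        simp

-- ===== VERDICT (by name: the statement is the Claim_ definition above) =====
theorem format_label_spec : Claim_equal_format_label := by
  intro field _
  unfold Spec_format_label format_label format_label_alt
  have hb := PySem.List.foldl_pyRange_zero_pyGetD' field.toList ' '
    (fun (st : Bool × List Char) c =>
      ((c == '_'), st.2 ++ [if st.1 then PySem.Chars.upperChar c else PySem.Chars.lowerChar c]))
    (true, [])
  simp only [PySem.Str.len_eq] at hb ⊢
  rw [hb, pvFoldl_eq_goA, pvKey]
  obtain ⟨h, t, hht⟩ := pvSplitOn_ne_nil field.toList
  simp [hht, pvHdMap]
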